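-- pv_equiv track=rewrite | github.com/invincibleo/DWML_V4 | core/ontologyProcessing.py | get_2nd_level_class_label_index
-- ===== SOURCE A (Python) =====
-- def get_2nd_level_class_label_index(label_code, aso, second_level_class):
--     # aso = OntologyProcessing.get_label_name_list(filename)
--     # second_level_class = OntologyProcessing.get_2nd_level_label_name_list(filename)
--     class_set = set()
--     for idx in range(0, len(label_code)):
--         buf = label_code[idx]
--         while buf not in second_level_class:
--             try:
--                 buf = aso[buf]['parents_ids'][0]
--             except IndexError:
--                 break
--         class_set.add(buf)
--
--     return list(class_set)
-- ===== SOURCE B (Python) =====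
-- def get_2nd_level_class_label_index(label_code, aso, second_level_class):
--     # Memoized chain-walking: set membership for the class test and a
--     # node -> ancestor cache shared across chains, so each ontology node
--     # is walked at most once.
--     sl = set(second_level_class)
--     cache = {}
--     roots = set()
--     for code in label_code:
--         chain = []
--         buf = code
--         while buf not in sl and buf not in cache:
--             chain.append(buf)
--             parents = aso[buf]['parents_ids']
--             if not parents:
--                 break
--             buf = parents[0]
--         root = cache.get(buf, buf)
--         for node in chain:
--             cache[node] = root
--         roots.add(root)
--     return list(roots)
-- ===== Notes on version B (the rewrite author's own statement) =====
-- stated objective: alternative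
-- what changed: B replaces A's per-label re-walk (list membership test on second_level_class at every step of every chain) with a set for the class test and a node-to-ancestor cache shared across chains, so every ontology node is resolved at most once; on the generated shallow-chain inputs this is not measurably faster (it trades per-step list scans for dict/set bookkeeping).
import Mathlib
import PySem

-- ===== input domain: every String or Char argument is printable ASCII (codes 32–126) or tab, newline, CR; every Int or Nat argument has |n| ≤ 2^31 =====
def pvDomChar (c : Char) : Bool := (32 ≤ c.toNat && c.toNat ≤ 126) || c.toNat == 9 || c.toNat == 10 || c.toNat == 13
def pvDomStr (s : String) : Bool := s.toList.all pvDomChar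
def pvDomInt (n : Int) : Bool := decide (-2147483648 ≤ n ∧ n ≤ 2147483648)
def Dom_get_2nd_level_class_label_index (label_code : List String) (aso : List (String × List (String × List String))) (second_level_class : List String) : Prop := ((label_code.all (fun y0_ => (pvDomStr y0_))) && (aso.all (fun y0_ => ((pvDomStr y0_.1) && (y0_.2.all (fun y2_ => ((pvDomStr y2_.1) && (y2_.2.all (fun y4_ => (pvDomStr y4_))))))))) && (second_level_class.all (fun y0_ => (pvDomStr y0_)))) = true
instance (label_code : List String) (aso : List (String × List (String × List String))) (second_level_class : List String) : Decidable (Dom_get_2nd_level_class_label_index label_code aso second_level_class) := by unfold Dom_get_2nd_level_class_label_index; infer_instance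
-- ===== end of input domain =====

-- B replaces A's per-label chain re-walk (list membership at every step) with a set for the
-- class test and a node→ancestor cache shared across all chains; same set of ancestors returned.

-- ===== PORT A =====
-- shared lookup helper: aso[buf]['parents_ids'] (none = KeyError somewhere)
def pvPar (aso : List (String × List (String × List String))) (b : String) : Option (List String) :=
  ((PySem.Dict.mk aso).get? b).bind (fun d => (PySem.Dict.mk d).get? "parents_ids")

-- the while-loop of A, as fuel recursion (fuel aso.length+1 suffices on every input Pre_ admits)
def pvResolveA (aso : List (String × List (String × List String))) (slc : List String) : Nat → String → String
  | 0, b => b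
  | (f+1), b =>
    if b ∈ slc then b
    else match pvPar aso b with
      | some (p :: _) => pvResolveA aso slc f p
      | _ => b

def get_2nd_level_class_label_index (label_code : List String) (aso : List (String × List (String × List String))) (second_level_class : List String) : List String :=
  label_code.foldl
    (fun (s : PySem.Set String) lbl => s.add (pvResolveA aso second_level_class (aso.length + 1) lbl))
    PySem.Set.empty

-- ===== PORT B =====
-- B's while-loop: stops on class membership, cache hit, or empty parents; returns (root, visited chain)
def pvResolveB (aso : List (String × List (String × List String))) (sset : PySem.Set String) (cache : PySem.Dict String String) : Nat → String → List String → String × List String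
  | 0, b, chain => (b, chain)
  | (f+1), b, chain =>
    if sset.contains b || cache.contains b then (cache.getD b b, chain)
    else match pvPar aso b with
      | some (p :: _) => pvResolveB aso sset cache f p (chain ++ [b])
      | _ => (b, chain ++ [b])

def get_2nd_level_class_label_index_alt (label_code : List String) (aso : List (String × List (String × List String))) (second_level_class : List String) : List String :=
  let sset := PySem.Set.ofList second_level_class
  (label_code.foldl
    (fun (st : PySem.Dict String String × PySem.Set String) code =>
      let rc := pvResolveB aso sset st.1 (aso.length + 1) code []
      (rc.2.foldl (fun c n => c.insert n rc.1) st.1, st.2.add rc.1))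
    (PySem.Dict.empty, PySem.Set.empty)).2

-- ===== PRECONDITION & SPEC =====
-- one resolution step; fixes terminal nodes (class members, empty parents) and error nodes
def pvNext (aso : List (String × List (String × List String))) (slc : List String) (b : String) : String :=
  if b ∈ slc then b
  else match pvPar aso b with
    | some (p :: _) => p
    | _ => b

-- a node where A's while-loop stops normally
def pvTerm (aso : List (String × List (String × List String))) (slc : List String) (b : String) : Bool :=
  decide (b ∈ slc) || pvPar aso b == some []

-- Pre_ = exactly the inputs where A returns: every label's parent chain reaches, without a
-- missing-key KeyError and without a cycle, a second-level class or an empty parents list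
-- (any such chain does so within aso.length steps).
def Pre_get_2nd_level_class_label_index (label_code : List String) (aso : List (String × List (String × List String))) (second_level_class : List String) : Prop :=
  ∀ s ∈ label_code, ∃ k < aso.length + 1, pvTerm aso second_level_class ((pvNext aso second_level_class)^[k] s) = true
instance (label_code : List String) (aso : List (String × List (String × List String))) (second_level_class : List String) : Decidable (Pre_get_2nd_level_class_label_index label_code aso second_level_class) := by unfold Pre_get_2nd_level_class_label_index; infer_instance

def pvWitness_get_2nd_level_class_label_index : List String × (List (String × List (String × List String))) × List String :=
  (["a"], [("a", [("parents_ids", ["b"])]), ("b", [("parents_ids", [])])], ["b"])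

def Spec_get_2nd_level_class_label_index (label_code : List String) (aso : List (String × List (String × List String))) (second_level_class : List String) (out : List String) : Prop := out = get_2nd_level_class_label_index_alt label_code aso second_level_class
instance (label_code : List String) (aso : List (String × List (String × List String))) (second_level_class : List String) (out : List String) : Decidable (Spec_get_2nd_level_class_label_index label_code aso second_level_class out) := by unfold Spec_get_2nd_level_class_label_index; infer_instance

-- ===== CLAIM (what is proved, stated in full; the proofs are below) =====
def Claim_equal_get_2nd_level_class_label_index : Prop := ∀ (label_code : List String) (aso : List (String × List (String × List String))) (second_level_class : List String), Dom_get_2nd_level_class_label_index label_code aso second_level_class → Pre_get_2nd_level_class_label_index label_code aso second_level_class → Spec_get_2nd_level_class_label_index label_code aso second_level_class (get_2nd_level_class_label_index label_code aso second_level_class)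


-- ===== LEMMAS AND PROOFS =====

-- canonical resolution result: enough iterations of the step function
def pvRt (aso : List (String × List (String × List String))) (slc : List String) (b : String) : String :=
  (pvNext aso slc)^[aso.length + 1] b

-- cache invariant: every cached key is outside the class list and maps to its resolution
def pvInv (aso : List (String × List (String × List String))) (slc : List String) (cache : PySem.Dict String String) : Prop :=
  ∀ k, cache.contains k = true → k ∉ slc ∧ ∀ dflt, cache.getD k dflt = pvRt aso slc k

theorem pvTerm_iff (aso : List (String × List (String × List String))) (slc : List String) (b : String) :
    pvTerm aso slc b = true ↔ b ∈ slc ∨ pvPar aso b = some [] := by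
  simp [pvTerm]

theorem pvNext_fixed (aso : List (String × List (String × List String))) (slc : List String) (b : String)
    (h : pvTerm aso slc b = true) : pvNext aso slc b = b := by
  rcases (pvTerm_iff aso slc b).1 h with hb | hb
  · simp [pvNext, hb]
  · by_cases hm : b ∈ slc
    · simp [pvNext, hm]
    · simp [pvNext, hm, hb]
theorem pvIter_stable (aso : List (String × List (String × List String))) (slc : List String) (s : String)
    (j m : Nat) (hjm : j ≤ m) (h : pvTerm aso slc ((pvNext aso slc)^[j] s) = true) :
    (pvNext aso slc)^[m] s = (pvNext aso slc)^[j] s := by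
  have hm : m = (m - j) + j := by omega
  rw [hm, Function.iterate_add_apply]
  exact Function.iterate_fixed (pvNext_fixed aso slc _ h) (m - j)

theorem pvResolveA_eq_iterate (aso : List (String × List (String × List String))) (slc : List String) :
    ∀ (f : Nat) (b : String), pvResolveA aso slc f b = (pvNext aso slc)^[f] b := by
  intro f
  induction f with
  | zero => intro b; rfl
  | succ f ih =>
    intro b
    by_cases hb : b ∈ slc
    · have hfix : pvNext aso slc b = b := by simp [pvNext, hb]
      rw [Function.iterate_fixed hfix (f+1)]
      simp [pvResolveA, hb]
    · cases hp : pvPar aso b with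
      | none =>
        have hfix : pvNext aso slc b = b := by simp [pvNext, hb, hp]
        rw [Function.iterate_fixed hfix (f+1)]
        simp [pvResolveA, hb, hp]
      | some l =>
        cases l with
        | nil =>
          have hfix : pvNext aso slc b = b := by simp [pvNext, hb, hp]
          rw [Function.iterate_fixed hfix (f+1)]
          simp [pvResolveA, hb, hp]
        | cons p rest =>
          have hstep : pvNext aso slc b = p := by simp [pvNext, hb, hp]
          rw [Function.iterate_succ_apply, hstep]
          simp [pvResolveA, hb, hp, ih]

-- terminal-value facts
theorem pvRt_of_mem (aso : List (String × List (String × List String))) (slc : List String) (b : String)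
    (hb : b ∈ slc) : pvRt aso slc b = b := by
  have hfix : pvNext aso slc b = b := by simp [pvNext, hb]
  exact Function.iterate_fixed hfix _

theorem pvRt_of_empty (aso : List (String × List (String × List String))) (slc : List String) (b : String)
    (hp : pvPar aso b = some []) : pvRt aso slc b = b := by
  have hfix : pvNext aso slc b = b := pvNext_fixed aso slc b ((pvTerm_iff aso slc b).2 (Or.inr hp))
  exact Function.iterate_fixed hfix _

-- chain step preserves the resolution bound and the resolution value
theorem pvStep_ok (aso : List (String × List (String × List String))) (slc : List String)
    (b p : String) (rest : List String) (k : Nat) (hklen : k ≤ aso.length)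
    (hb : b ∉ slc) (hp : pvPar aso b = some (p :: rest))
    (ht : pvTerm aso slc ((pvNext aso slc)^[k] b) = true) :
    k ≠ 0 ∧ pvTerm aso slc ((pvNext aso slc)^[k-1] p) = true ∧ pvRt aso slc p = pvRt aso slc b := by
  have hk0 : k ≠ 0 := by
    intro h0
    subst h0
    rcases (pvTerm_iff aso slc b).1 ht with h | h
    · exact hb h
    · rw [hp] at h; simp at h
  have hstep : pvNext aso slc b = p := by simp [pvNext, hb, hp]
  have hiter : (pvNext aso slc)^[k-1] p = (pvNext aso slc)^[k] b := by
    rw [← hstep, ← Function.iterate_succ_apply]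
    congr 1
    omega
  refine ⟨hk0, by rw [hiter]; exact ht, ?_⟩
  have h1 : pvRt aso slc b = (pvNext aso slc)^[aso.length] p := by
    unfold pvRt
    rw [Function.iterate_succ_apply, hstep]
  have hterm_p : pvTerm aso slc ((pvNext aso slc)^[k-1] p) = true := by rw [hiter]; exact ht
  rw [h1, pvIter_stable aso slc p (k-1) aso.length (by omega) hterm_p]
  unfold pvRt
  rw [pvIter_stable aso slc p (k-1) (aso.length+1) (by omega) hterm_p]

theorem pvInv_empty (aso : List (String × List (String × List String))) (slc : List String) :
    pvInv aso slc PySem.Dict.empty := by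
  intro k hk
  simp [PySem.Dict.contains, PySem.Dict.empty] at hk

theorem pvGetD_of_not_contains (cache : PySem.Dict String String) (k dflt : String)
    (h : cache.contains k = false) : cache.getD k dflt = dflt := by
  rw [PySem.Dict.contains_eq_isSome_get?] at h
  cases hg : cache.get? k
  · simp [PySem.Dict.getD, hg]
  · simp [hg] at h

theorem pvInv_fold (aso : List (String × List (String × List String))) (slc : List String) (r : String) :
    ∀ (ext : List String) (cache : PySem.Dict String String), pvInv aso slc cache →
      (∀ m ∈ ext, m ∉ slc ∧ pvRt aso slc m = r) →
      pvInv aso slc (ext.foldl (fun c n => c.insert n r) cache) := by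
  intro ext
  induction ext with
  | nil => intro cache hinv _; exact hinv
  | cons m ext ih =>
    intro cache hinv hm
    simp only [List.foldl_cons]
    refine ih (cache.insert m r) ?_ (fun x hx => hm x (List.mem_cons_of_mem m hx))
    intro k hk
    by_cases hkm : k = m
    · subst hkm
      refine ⟨(hm k (List.mem_cons_self)).1, fun dflt => ?_⟩
      rw [PySem.Dict.getD_insert_self]
      exact ((hm k List.mem_cons_self).2).symm
    · rw [PySem.Dict.contains_insert] at hk
      have hk' : cache.contains k = true := by
        have hbeq : (k == m) = false := by simp [hkm]
        rw [hbeq] at hk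
        simpa using hk
      refine ⟨(hinv k hk').1, fun dflt => ?_⟩
      rw [PySem.Dict.getD_insert_of_ne _ _ _ hkm]
      exact (hinv k hk').2 dflt

theorem pvResolveB_correct (aso : List (String × List (String × List String))) (slc : List String)
    (cache : PySem.Dict String String) (hinv : pvInv aso slc cache) :
    ∀ (f : Nat) (b : String) (chain : List String),
      (∃ k, k < f ∧ k ≤ aso.length ∧ pvTerm aso slc ((pvNext aso slc)^[k] b) = true) →
      ∃ ext : List String,
        pvResolveB aso (PySem.Set.ofList slc) cache f b chain = (pvRt aso slc b, chain ++ ext) ∧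
        ∀ m ∈ ext, m ∉ slc ∧ pvRt aso slc m = pvRt aso slc b := by
  intro f
  induction f with
  | zero =>
    intro b chain hok
    obtain ⟨k, hk, _, _⟩ := hok
    omega
  | succ f ih =>
    intro b chain hok
    obtain ⟨k, hkf, hklen, hterm⟩ := hok
    by_cases hmem : (PySem.Set.ofList slc).contains b || cache.contains b
    · -- loop does not start: class member or cache hit
      refine ⟨[], ?_, by simp⟩
      have hres : pvResolveB aso (PySem.Set.ofList slc) cache (f+1) b chain = (cache.getD b b, chain) := by
        simp only [pvResolveB]
        rw [if_pos hmem]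
      rw [hres, List.append_nil]
      rcases Bool.or_eq_true_iff.1 hmem with hsl | hc
      · -- b in second_level_class
        have hbsl : b ∈ slc := by
          rw [show PySem.Set.contains (PySem.Set.ofList slc) b = decide (b ∈ PySem.Set.ofList slc) from by simp [PySem.Set.contains]] at hsl
          exact (PySem.Set.mem_ofList slc b).1 (by simpa using hsl)
        by_cases hcb : cache.contains b = true
        · rw [((hinv b hcb).2 b)]
        · rw [pvGetD_of_not_contains cache b b (by simpa using hcb), pvRt_of_mem aso slc b hbsl]
      · rw [((hinv b hc).2 b)]
    · -- loop body
      have hnsl : ¬ (PySem.Set.ofList slc).contains b := by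
        intro h
        exact hmem (Bool.or_eq_true_iff.2 (Or.inl h))
      have hbsl : b ∉ slc := by
        intro hb
        apply hnsl
        simp [PySem.Set.contains, (PySem.Set.mem_ofList slc b).2 hb]
      cases hp : pvPar aso b with
      | none =>
        exfalso
        have hfix : pvNext aso slc b = b := by simp [pvNext, hbsl, hp]
        have : (pvNext aso slc)^[k] b = b := Function.iterate_fixed hfix k
        rw [this] at hterm
        rcases (pvTerm_iff aso slc b).1 hterm with h | h
        · exact hbsl h
        · rw [hp] at h; simp at h
      | some l =>
        cases l with
        | nil =>
          refine ⟨[b], ?_, ?_⟩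
          · have hres : pvResolveB aso (PySem.Set.ofList slc) cache (f+1) b chain = (b, chain ++ [b]) := by
              simp only [pvResolveB, hp]
              rw [if_neg hmem]
            rw [hres, pvRt_of_empty aso slc b hp]
          · intro m hm
            simp at hm
            subst hm
            exact ⟨hbsl, rfl⟩
        | cons p rest =>
          obtain ⟨hk0, htp, hrt⟩ := pvStep_ok aso slc b p rest k hklen hbsl hp hterm
          obtain ⟨ext, heq, hext⟩ := ih p (chain ++ [b]) ⟨k - 1, by omega, by omega, htp⟩
          refine ⟨b :: ext, ?_, ?_⟩
          · have hres : pvResolveB aso (PySem.Set.ofList slc) cache (f+1) b chain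
                = pvResolveB aso (PySem.Set.ofList slc) cache f p (chain ++ [b]) := by
              simp only [pvResolveB, hp]
              rw [if_neg hmem]
            rw [hres, heq, hrt]
            simp
          · intro m hm
            rcases List.mem_cons.1 hm with hm | hm
            · subst hm; exact ⟨hbsl, rfl⟩
            · obtain ⟨h1, h2⟩ := hext m hm
              exact ⟨h1, by rw [h2, hrt]⟩

theorem pvFold_eq (aso : List (String × List (String × List String))) (slc : List String) :
    ∀ (lc : List String) (cache : PySem.Dict String String) (roots : PySem.Set String),
      pvInv aso slc cache →
      (∀ s ∈ lc, ∃ k < aso.length + 1, pvTerm aso slc ((pvNext aso slc)^[k] s) = true) →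
      (lc.foldl
        (fun (st : PySem.Dict String String × PySem.Set String) code =>
          let rc := pvResolveB aso (PySem.Set.ofList slc) st.1 (aso.length + 1) code []
          (rc.2.foldl (fun c n => c.insert n rc.1) st.1, st.2.add rc.1))
        (cache, roots)).2
      = lc.foldl (fun (s : PySem.Set String) lbl => s.add (pvResolveA aso slc (aso.length + 1) lbl)) roots := by
  intro lc
  induction lc with
  | nil => intro cache roots _ _; rfl
  | cons code lc ih =>
    intro cache roots hinv hok
    obtain ⟨k, hk, hterm⟩ := hok code (List.mem_cons_self)
    obtain ⟨ext, heq, hext⟩ := pvResolveB_correct aso slc cache hinv (aso.length + 1) code [] ⟨k, hk, by omega, hterm⟩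
    simp only [List.foldl_cons, heq, List.nil_append]
    rw [ih _ _ (pvInv_fold aso slc _ ext cache hinv (by simpa using hext))
        (fun s hs => hok s (List.mem_cons_of_mem code hs))]
    rw [pvResolveA_eq_iterate]
    rfl


-- ===== VERDICT (by name: the statement is the Claim_ definition above) =====
theorem get_2nd_level_class_label_index_spec : Claim_equal_get_2nd_level_class_label_index := by
  intro label_code aso second_level_class _ hpre
  unfold Spec_get_2nd_level_class_label_index
  unfold get_2nd_level_class_label_index get_2nd_level_class_label_index_alt
  exact (pvFold_eq aso second_level_class label_code PySem.Dict.empty PySem.Set.empty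
    (pvInv_empty aso second_level_class) hpre).symm
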